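-- pv_equiv track=rewrite | github.com/b0ngokarl/logger | core/traceroute.py | get_network_topology
-- ===== SOURCE A (Python) =====
-- from typing import Dict, List, Tuple, Optional
--
-- def get_network_topology(traceroute_data: Dict[str, Dict[str, List[Tuple[str, str, float]]]]) -> Dict[str, List[str]]:
--     """
--     Build network topology from traceroute data.
--
--     Args:
--         traceroute_data: Dictionary of traceroute data for multiple destinations
--
--     Returns:
--         Dictionary mapping each node to its neighbors
--     """
--     topology = {}
--
--     for dest, routes in traceroute_data.items():
--         for direction, hops in routes.items():
--             for from_node, to_node, _ in hops:
--                 # Add forward connection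
--                 if from_node not in topology:
--                     topology[from_node] = []
--                 if to_node not in topology[from_node]:
--                     topology[from_node].append(to_node)
--
--                 # Add reverse connection (mesh networks are bidirectional)
--                 if to_node not in topology:
--                     topology[to_node] = []
--                 if from_node not in topology[to_node]:
--                     topology[to_node].append(from_node)
--
--     return topology
-- ===== SOURCE B (Python) =====
-- def get_network_topology(traceroute_data):
--     raw = {}
--     for dest, routes in traceroute_data.items():
--         for direction, hops in routes.items():
--             for from_node, to_node, _ in hops:
--                 raw.setdefault(from_node, []).append(to_node)
--                 raw.setdefault(to_node, []).append(from_node)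
--     return {node: list(dict.fromkeys(neighbors)) for node, neighbors in raw.items()}
-- ===== Notes on version B (the rewrite author's own statement) =====
-- stated objective: simpler
-- what changed: B drops the four inline membership/creation branches: a first pass appends both directions of every edge unconditionally via setdefault, and a single second pass collapses each neighbor list with dict.fromkeys, preserving key and first-occurrence neighbor order.
import Mathlib
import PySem

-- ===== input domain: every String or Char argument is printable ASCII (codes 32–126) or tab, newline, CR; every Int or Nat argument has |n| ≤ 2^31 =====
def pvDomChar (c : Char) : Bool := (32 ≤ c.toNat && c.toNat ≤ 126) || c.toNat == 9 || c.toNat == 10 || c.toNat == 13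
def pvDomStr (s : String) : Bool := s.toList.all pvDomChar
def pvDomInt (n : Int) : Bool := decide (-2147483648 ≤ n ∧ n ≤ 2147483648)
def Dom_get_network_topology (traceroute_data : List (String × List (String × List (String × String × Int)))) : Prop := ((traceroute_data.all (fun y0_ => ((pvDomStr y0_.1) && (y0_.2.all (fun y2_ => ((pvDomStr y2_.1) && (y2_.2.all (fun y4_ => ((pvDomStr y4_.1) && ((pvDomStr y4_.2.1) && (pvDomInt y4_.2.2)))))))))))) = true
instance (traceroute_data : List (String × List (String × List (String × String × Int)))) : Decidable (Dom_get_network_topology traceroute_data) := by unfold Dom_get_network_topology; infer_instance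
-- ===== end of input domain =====

-- B replaces A's four inline membership/creation branches by an unconditional two-way append
-- pass plus a separate dict.fromkeys dedup pass (same result; different decomposition, not faster).

-- ===== PORT A =====
def get_network_topology (traceroute_data : List (String × List (String × List (String × String × Int)))) : List (String × List String) :=
  (traceroute_data.foldl (fun topology dest_routes =>
    dest_routes.2.foldl (fun topology direction_hops =>
      direction_hops.2.foldl (fun topology hop =>
        let from_node := hop.1
        let to_node := hop.2.1
        -- Add forward connection
        let topology := if topology.contains from_node then topology else topology.insert from_node ([] : List String)
        let topology := if (topology.getD from_node []).contains to_node then topology else topology.modify from_node [] (fun l => l ++ [to_node])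
        -- Add reverse connection (mesh networks are bidirectional)
        let topology := if topology.contains to_node then topology else topology.insert to_node ([] : List String)
        if (topology.getD to_node []).contains from_node then topology else topology.modify to_node [] (fun l => l ++ [from_node]))
        topology)
      topology)
    PySem.Dict.empty).items

-- ===== PORT B =====
def get_network_topology_alt (traceroute_data : List (String × List (String × List (String × String × Int)))) : List (String × List String) :=
  let raw := traceroute_data.foldl (fun raw dest_routes =>
    dest_routes.2.foldl (fun raw direction_hops =>
      direction_hops.2.foldl (fun raw hop =>
        ((raw.modify hop.1 [] (fun l => l ++ [hop.2.1])).modify hop.2.1 [] (fun l => l ++ [hop.1])))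
        raw)
      raw)
    (PySem.Dict.empty : PySem.Dict String (List String))
  -- {node: list(dict.fromkeys(neighbors)) for node, neighbors in raw.items()}
  (raw.items.foldl (fun d p => d.insert p.1 (PySem.List.dedup p.2)) PySem.Dict.empty).items

-- ===== PRECONDITION & SPEC =====
def Spec_get_network_topology (traceroute_data : List (String × List (String × List (String × String × Int)))) (out : List (String × List String)) : Prop := out = get_network_topology_alt traceroute_data
instance (traceroute_data : List (String × List (String × List (String × String × Int)))) (out : List (String × List String)) : Decidable (Spec_get_network_topology traceroute_data out) := by unfold Spec_get_network_topology; infer_instance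

-- ===== CLAIM (what is proved, stated in full; the proofs are below) =====
def Claim_equal_get_network_topology : Prop := ∀ (traceroute_data : List (String × List (String × List (String × String × Int)))), Dom_get_network_topology traceroute_data → Spec_get_network_topology traceroute_data (get_network_topology traceroute_data)

-- ===== LEMMAS AND PROOFS =====

-- A's per-edge half-step: ensure the key exists, then append the neighbor if absent.
def touchA (d : PySem.Dict String (List String)) (u v : String) : PySem.Dict String (List String) :=
  let d1 := if d.contains u then d else d.insert u ([] : List String)
  if (d1.getD u []).contains v then d1 else d1.modify u [] (fun l => l ++ [v])

-- B's per-edge half-step: unconditional append via setdefault.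
def touchB (d : PySem.Dict String (List String)) (u v : String) : PySem.Dict String (List String) :=
  d.modify u [] (fun l => l ++ [v])

-- Invariant: same keys (B's keys Nodup), and A's value at each key is the ordered dedup of B's.
def TopoInv (dA dB : PySem.Dict String (List String)) : Prop :=
  dA.keys = dB.keys ∧ dB.keys.Nodup ∧ ∀ k, dA.getD k [] = PySem.List.dedup (dB.getD k [])

lemma foldl_flatMap1 {α β γ : Type} (f : γ → α → γ) (g : β → List α) (l : List β) (d : γ) :
    l.foldl (fun d x => (g x).foldl f d) d = (l.flatMap g).foldl f d := by
  induction l generalizing d with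
  | nil => rfl
  | cons x xs ih => simp [List.flatMap_cons, List.foldl_append, ih]

def edgesOf (traceroute_data : List (String × List (String × List (String × String × Int)))) : List (String × String × Int) :=
  traceroute_data.flatMap (fun p => p.2.flatMap (fun q => q.2))

lemma touch_inv (dA dB : PySem.Dict String (List String)) (u v : String) (h : TopoInv dA dB) :
    TopoInv (touchA dA u v) (touchB dB u v) := by
  obtain ⟨hk, hnd, hv⟩ := h
  have hc : dA.contains u = dB.contains u := by
    rw [PySem.Dict.contains_eq_decide_mem_keys, PySem.Dict.contains_eq_decide_mem_keys, hk]
  by_cases hu : dB.contains u = true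
  · -- key already present on both sides
    have hAc : dA.contains u = true := by rw [hc]; exact hu
    have hkeysB : (touchB dB u v).keys = dB.keys := by
      rw [touchB, PySem.Dict.keys_modify, PySem.Dict.keys_insert_of_contains _ _ hu]
    refine ⟨?_, by rw [hkeysB]; exact hnd, ?_⟩
    · -- keys
      rw [hkeysB, touchA]
      simp only [hAc, if_true]
      split
      · exact hk
      · rw [PySem.Dict.keys_modify, PySem.Dict.keys_insert_of_contains _ _ hAc, hk]
    · intro k
      by_cases hku : k = u
      · subst hku
        have hBv : (touchB dB k v).getD k [] = dB.getD k [] ++ [v] :=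
          PySem.Dict.getD_modify_self dB k [] _
        have hAval := hv k
        have hmem_iff : v ∈ dA.getD k [] ↔ v ∈ PySem.List.dedup (dB.getD k []) := by
          rw [hAval]
        rw [hBv, PySem.List.dedup_eq_ofList, PySem.Set.ofList_append_singleton,
          PySem.Set.add_eq_ite, ← PySem.List.dedup_eq_ofList]
        by_cases hmem : v ∈ dA.getD k []
        · have hT : touchA dA k v = dA := by
            rw [touchA]; simp [hAc, hmem]
          rw [hT, if_pos (hmem_iff.mp hmem), hAval]
        · have hT : touchA dA k v = dA.modify k [] (fun l => l ++ [v]) := by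
            rw [touchA]; simp [hAc, hmem]
          rw [hT, PySem.Dict.getD_modify_self, if_neg (fun h => hmem (hmem_iff.mpr h)), hAval]
      · have hBk : (touchB dB u v).getD k [] = dB.getD k [] :=
          PySem.Dict.getD_modify_of_ne dB [] _ hku
        rw [hBk, touchA]
        simp only [hAc, if_true]
        split
        · exact hv k
        · rw [PySem.Dict.getD_modify_of_ne dA [] _ hku]; exact hv k
  · -- fresh key u on both sides
    have hu' : dB.contains u = false := by simpa using hu
    have hAc : dA.contains u = false := by rw [hc]; exact hu'
    have hBval : dB.getD u [] = [] := PySem.Dict.getD_of_not_contains dB [] hu'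
    have hmemB : u ∉ dB.keys := by
      have := PySem.Dict.contains_eq_decide_mem_keys dB u
      rw [hu'] at this; simpa using this.symm
    have hkeysB : (touchB dB u v).keys = dB.keys ++ [u] := by
      rw [touchB, PySem.Dict.keys_modify, PySem.Dict.keys_insert_of_not_contains _ _ hu']
    have hA1 : touchA dA u v = (dA.insert u []).modify u [] (fun l => l ++ [v]) := by
      rw [touchA]
      simp only [hAc, if_neg, Bool.false_eq_true, not_false_iff]
      rw [PySem.Dict.getD_insert_self]
      rfl
    refine ⟨?_, ?_, ?_⟩
    · rw [hkeysB, hA1, PySem.Dict.keys_modify,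
        PySem.Dict.keys_insert_of_contains _ _ (PySem.Dict.contains_insert_self dA u ([] : List String)),
        PySem.Dict.keys_insert_of_not_contains _ _ hAc, hk]
    · rw [hkeysB]
      refine List.Nodup.append hnd (List.nodup_singleton u) ?_
      intro a ha hb
      simp only [List.mem_singleton] at hb
      subst hb
      exact hmemB ha
    · intro k
      by_cases hku : k = u
      · subst hku
        rw [hA1, PySem.Dict.getD_modify_self, PySem.Dict.getD_insert_self,
          touchB, PySem.Dict.getD_modify_self, hBval]
        rfl
      · rw [hA1, PySem.Dict.getD_modify_of_ne _ [] _ hku,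
          PySem.Dict.getD_insert_of_ne _ _ _ hku,
          touchB, PySem.Dict.getD_modify_of_ne _ [] _ hku]
        exact hv k

lemma foldl_inv (l : List (String × String × Int)) (dA dB : PySem.Dict String (List String))
    (h : TopoInv dA dB) :
    TopoInv (l.foldl (fun d h => touchA (touchA d h.1 h.2.1) h.2.1 h.1) dA)
        (l.foldl (fun d h => touchB (touchB d h.1 h.2.1) h.2.1 h.1) dB) := by
  induction l generalizing dA dB with
  | nil => exact h
  | cons e es ih =>
    exact ih _ _ (touch_inv _ _ _ _ (touch_inv _ _ _ _ h))

lemma portA_eq (td : List (String × List (String × List (String × String × Int)))) :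
    get_network_topology td
      = ((edgesOf td).foldl (fun d h => touchA (touchA d h.1 h.2.1) h.2.1 h.1) PySem.Dict.empty).items := by
  unfold get_network_topology edgesOf
  simp only [foldl_flatMap1]
  rfl

lemma portB_eq (td : List (String × List (String × List (String × String × Int)))) :
    get_network_topology_alt td
      = ((((edgesOf td).foldl (fun d h => touchB (touchB d h.1 h.2.1) h.2.1 h.1) PySem.Dict.empty).items).foldl
          (fun d p => d.insert p.1 (PySem.List.dedup p.2)) PySem.Dict.empty).items := by
  unfold get_network_topology_alt edgesOf
  simp only [foldl_flatMap1]
  rfl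

-- ===== VERDICT (by name: the statement is the Claim_ definition above) =====
theorem get_network_topology_spec : Claim_equal_get_network_topology := by
  intro td _
  unfold Spec_get_network_topology
  rw [portA_eq, portB_eq]
  have h := foldl_inv (edgesOf td) PySem.Dict.empty PySem.Dict.empty
    ⟨rfl, PySem.Dict.nodup_keys_empty, fun k => rfl⟩
  obtain ⟨hk, hnd, hv⟩ := h
  set dA := (edgesOf td).foldl (fun d h => touchA (touchA d h.1 h.2.1) h.2.1 h.1) PySem.Dict.empty with hdA
  set dB := (edgesOf td).foldl (fun d h => touchB (touchB d h.1 h.2.1) h.2.1 h.1) PySem.Dict.empty with hdB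
  have hkeys_items : dB.items.map (fun p => p.1) = dB.keys := rfl
  have hfresh : (dB.items.foldl (fun d p => d.insert p.1 (PySem.List.dedup p.2)) PySem.Dict.empty).items
      = PySem.Dict.empty.items ++ dB.items.map (fun p => (p.1, PySem.List.dedup p.2)) := by
    exact PySem.Dict.items_foldl_insert_fresh dB.items (fun p => p.1) (fun p => PySem.List.dedup p.2)
      PySem.Dict.empty (fun a _ => PySem.Dict.contains_empty (κ := String) (ν := List String) a.1) (by rw [hkeys_items]; exact hnd)
  rw [hfresh]
  rw [PySem.Dict.items_eq_map_keys dA (by rw [hk]; exact hnd) ([] : List String),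
    PySem.Dict.items_eq_map_keys dB hnd ([] : List String)]
  have hni : (PySem.Dict.empty : PySem.Dict String (List String)).items = [] := rfl
  simp only [List.map_map, hni, List.nil_append, hk]
  apply List.map_congr_left
  intro k _
  simp [Function.comp, hv k]
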